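-- pv_equiv track=rewrite | github.com/hoyeonkim795/solving | swexpert/국민.py | solution
-- ===== SOURCE A (Python) =====
-- import collections
-- import collections
-- from itertools import permutations
--
-- def solution(word,cards):
--     words = collections.Counter(word)
--     for i in range(len(cards)):
--         cards[i] = list(cards[i])
--
--     # [['L', 'L', 'Z', 'K', 'E'], ['L', 'C', 'X', 'E', 'A'], ['C', 'V', 'P', 'P', 'S'], ['E', 'A', 'V', 'S', 'R'], ['F', 'X', 'P', 'F', 'P']]
--
--     # 열 permutaions 만들기
--     row= list(range(len(cards[0])))
--
--     row_candidate = list(map(list,permutations(row)))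
--
--     cnt = 0
--
--
--     for i in range(len(row_candidate)):
--         cand_word = []
--         for j in range(len(cards)):
--             cand_word.append(cards[j][row_candidate[i][j]])
--         if collections.Counter(cand_word) == words:
--             cnt += 1
--     return cnt
-- ===== SOURCE B (Python) =====
-- import collections
--
-- def solution(word, cards):
--     words = collections.Counter(word)
--     for i in range(len(cards)):
--         cards[i] = list(cards[i])
--     rows = len(cards)
--     cols = len(cards[0])
--     # only the first `cols` letters of each card are reachable by a column choice
--     grid = [[card[c] for c in range(cols)] for card in cards]
--
--     def dfs(perm, cols_left):
--         if not cols_left: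
--             sel = [grid[r][perm[r]] for r in range(rows)]
--             return 1 if collections.Counter(sel) == words else 0
--         return sum(dfs(perm + [cols_left[i]], cols_left[:i] + cols_left[i + 1:])
--                    for i in range(len(cols_left)))
--
--     return dfs([], list(range(cols)))
-- ===== Notes on version B (the rewrite author's own statement) =====
-- stated objective: alternative
-- what changed: A materialises the full itertools.permutations table as a list of lists and scans it with indexed loops building cand_word per permutation; B runs a recursive backtracking search over the remaining columns, building each column permutation incrementally and testing the selected letters at the leaf, keeping only O(cols) state instead of the cols!-sized table.
import Mathlib
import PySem

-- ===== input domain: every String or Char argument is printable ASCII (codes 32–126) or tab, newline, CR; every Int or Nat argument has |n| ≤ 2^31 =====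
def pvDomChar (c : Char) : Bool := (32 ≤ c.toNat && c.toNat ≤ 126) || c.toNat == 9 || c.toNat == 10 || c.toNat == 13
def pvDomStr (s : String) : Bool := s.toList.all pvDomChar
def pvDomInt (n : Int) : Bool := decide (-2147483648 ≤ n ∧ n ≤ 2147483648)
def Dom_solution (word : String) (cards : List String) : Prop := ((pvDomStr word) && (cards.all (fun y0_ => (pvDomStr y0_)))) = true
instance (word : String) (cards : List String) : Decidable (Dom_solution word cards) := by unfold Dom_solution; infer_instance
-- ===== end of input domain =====

-- B replaces A's materialised itertools.permutations table and its indexed scanning loops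
-- by a recursive backtracking search over the remaining columns that tests each column
-- permutation at the leaf.  (A mutates `cards` in place in Python; B performs the same
-- mutation; the equivalence proved here is about the return value.)

-- ===== PORT A =====
-- Python dict == ignores insertion order: same keys, same values (PySem.Dict '=' compares
-- the items list, so the port compares via get?).
def pyDictEq (d1 d2 : PySem.Dict Char Int) : Bool :=
  d1.items.all (fun kv => d2.get? kv.1 == some kv.2) &&
  d2.items.all (fun kv => d1.get? kv.1 == some kv.2)

-- cand_word built by the inner j-loop; the getD defaults are unreachable under Pre_ (IndexError excluded)
def pvSelWord (cardsL : List (List Char)) (cand : List Nat) : List Char :=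
  (List.range cardsL.length).map (fun j => (cardsL.getD j []).getD (cand.getD j 0) ' ')

def solution (word : String) (cards : List String) : Int :=
  let words := PySem.Dict.counter word.toList
  let cardsL := cards.map (·.toList)   -- cards[i] = list(cards[i])
  let row := List.range (cardsL.headD []).length   -- cards[0]: IndexError on [] excluded by Pre_
  let rowCand := PySem.List.permutations row row.length
  rowCand.foldl (fun cnt cand =>
    if pyDictEq (PySem.Dict.counter (pvSelWord cardsL cand)) words then cnt + 1 else cnt) 0

-- ===== PORT B =====
-- dfs(perm, cols_left); the leaf reads sel = [grid[r][perm[r]] for r in range(rows)]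
-- (the getD defaults are unreachable under Pre_, where Python's indexing cannot raise)
def solDfs (grid : List (List Char)) (words : PySem.Dict Char Int) (rows : Nat) :
    List Nat → List Nat → Int
  | perm, colsLeft =>
    if colsLeft.isEmpty then
      (if pyDictEq (PySem.Dict.counter
            ((List.range rows).map (fun r => (grid.getD r []).getD (perm.getD r 0) ' ')))
          words then 1 else 0)
    else ((List.range colsLeft.length).attach.map (fun i =>
      solDfs grid words rows (perm ++ [colsLeft.getD i.1 0]) (colsLeft.eraseIdx i.1))).sum
  termination_by _ colsLeft => colsLeft.length
  decreasing_by
    have h : i.1 < colsLeft.length := List.mem_range.mp i.2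
    rw [List.length_eraseIdx_of_lt h]; omega

def solution_alt (word : String) (cards : List String) : Int :=
  let words := PySem.Dict.counter word.toList
  let cardsL := cards.map (·.toList)
  let rows := cardsL.length
  let cols := (cardsL.headD []).length
  -- grid[r][c] = card[c]; the getD default is unreachable under Pre_ (card[c]: IndexError excluded)
  let grid := cardsL.map (fun card => (List.range cols).map (fun c => card.getD c ' '))
  solDfs grid words rows [] (List.range cols)

-- ===== PRECONDITION & SPEC =====
-- A raises IndexError when cards is empty (cards[0]), when len(cards) > len(cards[0])
-- (a permutation of range(len(cards[0])) is indexed at position j ≥ its length), or when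
-- some card is shorter than cards[0] (every column index reaches every row across the
-- permutations); Pre_ excludes exactly those inputs.
def Pre_solution (word : String) (cards : List String) : Prop :=
  cards ≠ [] ∧ cards.length ≤ (cards.headD "").length ∧
    ∀ s ∈ cards, (cards.headD "").length ≤ s.length
instance (word : String) (cards : List String) : Decidable (Pre_solution word cards) := by
  unfold Pre_solution; infer_instance

def pvWitness_solution : String × List String := ("ab", ["ab", "ba"])

def Spec_solution (word : String) (cards : List String) (out : Int) : Prop := out = solution_alt word cards
instance (word : String) (cards : List String) (out : Int) : Decidable (Spec_solution word cards out) := by unfold Spec_solution; infer_instance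

-- ===== CLAIM (what is proved, stated in full; the proofs are below) =====
def Claim_equal_solution : Prop := ∀ (word : String) (cards : List String), Dom_solution word cards → Pre_solution word cards → Spec_solution word cards (solution word cards)

-- ===== LEMMAS AND PROOFS =====

theorem pv_sum_flatMap {α : Type} (l : List α) (f : α → List Int) :
    (l.flatMap f).sum = (l.map (fun x => (f x).sum)).sum := by
  induction l with
  | nil => simp
  | cons x t ih => simp [List.flatMap_cons, ih]

theorem perms_zero {α : Type} (l : List α) : PySem.List.permutations l 0 = [[]] := by
  rw [PySem.List.permutations]

theorem perms_succ {α : Type} (l : List α) (r : Nat) :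
    PySem.List.permutations l (r+1) = (List.range l.length).flatMap
      (fun i => match l[i]? with
        | none => []
        | some y => (PySem.List.permutations (l.eraseIdx i) r).map (fun p => y :: p)) := by
  rw [PySem.List.permutations]
  apply List.flatMap_congr
  intro i _
  cases l[i]? <;> simp

theorem perms_length_mem {α : Type} :
    ∀ (r : Nat) (l : List α) (p : List α), p ∈ PySem.List.permutations l r → p.length = r := by
  intro r
  induction r with
  | zero => intro l p hp; rw [perms_zero] at hp; simp at hp; simp [hp]
  | succ r ih =>
    intro l p hp
    rw [perms_succ] at hp
    simp only [List.mem_flatMap, List.mem_range] at hp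
    obtain ⟨i, hi, hp⟩ := hp
    rw [List.getElem?_eq_getElem hi] at hp
    simp only [List.mem_map] at hp
    obtain ⟨q, hq, rfl⟩ := hp
    simp [ih _ _ hq]

theorem perms_mem_mem {α : Type} :
    ∀ (r : Nat) (l : List α) (p : List α), p ∈ PySem.List.permutations l r → ∀ x ∈ p, x ∈ l := by
  intro r
  induction r with
  | zero =>
    intro l p hp
    rw [perms_zero] at hp; simp at hp; subst hp; simp
  | succ r ih =>
    intro l p hp
    rw [perms_succ] at hp
    simp only [List.mem_flatMap, List.mem_range] at hp
    obtain ⟨i, hi, hp⟩ := hp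
    rw [List.getElem?_eq_getElem hi] at hp
    simp only [List.mem_map] at hp
    obtain ⟨q, hq, rfl⟩ := hp
    intro x hx
    rcases List.mem_cons.mp hx with h | h
    · subst h; exact List.getElem_mem hi
    · exact List.mem_of_mem_eraseIdx (ih _ _ hq x h)

-- B's grid agrees with direct card indexing on in-range column choices
theorem grid_entry (cardsL : List (List Char)) (cols : Nat) (j c : Nat) (hc : c < cols) :
    ((cardsL.map (fun card => (List.range cols).map (fun c => card.getD c ' '))).getD j []).getD c ' '
      = (cardsL.getD j []).getD c ' ' := by
  by_cases hj : j < cardsL.length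
  · simp [List.getD_eq_getElem?_getD, hj, hc]
  · have h1 : (cardsL.map
        (fun card => (List.range cols).map (fun c => card.getD c ' '))).getD j [] = [] := by
      apply List.getD_eq_default
      simpa using Nat.le_of_not_lt hj
    have h2 : cardsL.getD j [] = [] := List.getD_eq_default _ _ (Nat.le_of_not_lt hj)
    rw [h1, h2]

-- the DFS over remaining columns visits each full column permutation exactly once
theorem dfs_eq_sum (grid : List (List Char)) (words : PySem.Dict Char Int) (rows : Nat) :
    ∀ (k : Nat) (colsLeft : List Nat) (perm : List Nat), colsLeft.length = k →
      solDfs grid words rows perm colsLeft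
        = ((PySem.List.permutations colsLeft k).map
            (fun q => if pyDictEq (PySem.Dict.counter
                ((List.range rows).map
                  (fun r => (grid.getD r []).getD ((perm ++ q).getD r 0) ' '))) words
              then (1 : Int) else 0)).sum := by
  intro k
  induction k with
  | zero =>
    intro colsLeft perm hlen
    have : colsLeft = [] := List.eq_nil_of_length_eq_zero hlen
    subst this
    rw [solDfs, perms_zero]
    simp
  | succ k ih =>
    intro colsLeft perm hlen
    have hne : colsLeft.isEmpty = false := by
      cases colsLeft with
      | nil => simp at hlen
      | cons a t => simp
    rw [solDfs, hne, perms_succ, List.map_flatMap, pv_sum_flatMap]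
    simp only [Bool.false_eq_true, if_false]
    rw [List.attach_map_val
      (f := fun i => solDfs grid words rows (perm ++ [colsLeft.getD i 0]) (colsLeft.eraseIdx i))]
    apply congrArg
    apply List.map_congr_left
    intro i hi
    rw [List.mem_range] at hi
    rw [List.getElem?_eq_getElem hi]
    rw [ih _ _ (by rw [List.length_eraseIdx_of_lt hi, hlen]; omega), List.map_map]
    apply congrArg
    apply List.map_congr_left
    intro q _
    simp only [Function.comp_apply]
    rw [List.getD_eq_getElem colsLeft 0 hi]
    simp

-- ===== VERDICT (by name: the statement is the Claim_ definition above) =====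
theorem solution_spec : Claim_equal_solution := by
  intro word cards _hDom hPre
  unfold Spec_solution solution solution_alt
  obtain ⟨hne, hrc, _hall⟩ := hPre
  set words := PySem.Dict.counter word.toList with hwords
  set cardsL := cards.map (·.toList) with hcardsL
  set rows := cardsL.length with hrows
  set cols := (cardsL.headD []).length with hcols
  have hrowsc : rows ≤ cols := by
    have h1 : rows = cards.length := by simp [hrows, hcardsL]
    have h2 : cols = (cards.headD "").length := by
      cases cards with
      | nil => simp at hne
      | cons c cs => simp [hcols, hcardsL, String.length_toList]
    omega
  simp only [List.length_range]
  -- A side: foldl counting loop → 0/1 sum over all full permutations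
  rw [PySem.List.foldl_if_add_one, zero_add, ← PySem.List.sum_map_ite_one_zero]
  -- B side: DFS = the same 0/1 sum over the same permutations
  rw [dfs_eq_sum (cardsL.map (fun card => (List.range cols).map (fun c => card.getD c ' ')))
    words rows cols (List.range cols) [] (by simp)]
  apply congrArg
  apply List.map_congr_left
  intro q hq
  have hqlen : q.length = cols := by
    have := perms_length_mem cols (List.range cols) q hq
    simpa using this
  have hqc : ∀ c ∈ q, c < cols := fun c hc => by
    simpa using perms_mem_mem cols (List.range cols) q hq c hc
  have hsel : pvSelWord cardsL q
      = (List.range rows).map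
          (fun r => ((cardsL.map (fun card => (List.range cols).map (fun c => card.getD c ' '))).getD
            r []).getD (([] ++ q).getD r 0) ' ') := by
    unfold pvSelWord
    rw [List.nil_append, ← hrows]
    apply List.map_congr_left
    intro j hj
    rw [List.mem_range] at hj
    have hjq : j < q.length := by omega
    have hmem : q.getD j 0 ∈ q := by
      rw [List.getD_eq_getElem q 0 hjq]; exact List.getElem_mem hjq
    rw [grid_entry cardsL cols j (q.getD j 0) (hqc _ hmem)]
  rw [hsel]
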